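-- pv_equiv track=rewrite | github.com/ashddev/aoc-2025 | aoc/day06/part1.py | solve
-- ===== SOURCE A (Python) =====
-- import math
--
-- def solve(input: str):
--     rows = input.strip().split("\n")
--     transform_col = lambda c: int(c) if c.isnumeric() else c
--     matrix = [[transform_col(c) for c in r.strip().split()] for r in rows]
--     problems = len(matrix[0])
--     grand_total = 0
--     for p in range(problems):
--         nums = []
--         for row in matrix:
--             if row[p] == "*":
--                 grand_total += math.prod(nums)
--                 break
--             if row[p] == "+":
--                 grand_total += sum(nums)
--                 break
--             nums.append(row[p])
--     return grand_total
-- ===== SOURCE B (Python) =====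
-- import math
--
--
-- def solve(input: str):
--     rows = input.strip().split("\n")
--     matrix = [r.strip().split() for r in rows]
--     problems = len(matrix[0])
--     # one pending list of collected cells per column; None = column already aggregated
--     pending = [[] for _ in range(problems)]
--     total = 0
--     for row in matrix:
--         nxt = []
--         for p, nums in enumerate(pending):
--             if nums is None:
--                 nxt.append(None)
--             else:
--                 c = row[p]
--                 if c == "*":
--                     total += math.prod(nums)
--                     nxt.append(None)
--                 elif c == "+":
--                     total += sum(nums)
--                     nxt.append(None)
--                 else:
--                     nxt.append(nums + [int(c) if c.isnumeric() else c])
--         pending = nxt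
--     return total
-- ===== Notes on version B (the rewrite author's own statement) =====
-- stated objective: alternative
-- what changed: A makes one pass over the rows per column (restarting the row scan for every column); B makes a single row-major pass that maintains a pending token list per column (None once the column's operator has been seen) and aggregates with prod/sum only when the operator row is reached.
import Mathlib
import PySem

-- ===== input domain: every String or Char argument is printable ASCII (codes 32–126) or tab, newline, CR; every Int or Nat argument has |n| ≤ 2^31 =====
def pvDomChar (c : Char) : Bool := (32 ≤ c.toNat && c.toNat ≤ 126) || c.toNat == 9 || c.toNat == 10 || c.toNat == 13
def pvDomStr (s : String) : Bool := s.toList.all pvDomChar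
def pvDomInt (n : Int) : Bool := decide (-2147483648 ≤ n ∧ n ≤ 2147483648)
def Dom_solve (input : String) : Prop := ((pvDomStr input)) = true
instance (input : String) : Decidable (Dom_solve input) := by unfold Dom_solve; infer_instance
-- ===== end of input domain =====

-- B replaces A's per-column scans (restarting over the rows for every column) by ONE row-major pass
-- keeping per-column pending lists; same asymptotic cost, different decomposition (objective: alternative).

-- ===== PORT A =====
-- a matrix cell: int(c) if c.isnumeric() else c
inductive Cell where
  | num : Int → Cell
  | str : String → Cell
deriving DecidableEq, Repr

-- transform_col; on the ASCII domain isnumeric = isdigit, and ofStr? is `some` on digit strings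
def transform (c : String) : Cell :=
  if PySem.Str.strIsdigit c then Cell.num ((PySem.Int.ofStr? c).getD 0) else Cell.str c

-- numeric value of a cell; the .str case is never aggregated on Pre_ inputs (Python raises TypeError there)
def cellVal : Cell → Int
  | .num n => n
  | .str _ => 0

def prodCells (l : List Cell) : Int := l.foldl (fun a c => a * cellVal c) 1  -- math.prod(nums)
def sumCells (l : List Cell) : Int := l.foldl (fun a c => a + cellVal c) 0  -- sum(nums)

-- A's inner `for row in matrix` loop for one column p: the value added to grand_total
def colLoop (matrix : List (List Cell)) (p : Nat) (nums : List Cell) : Int :=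
  match matrix with
  | [] => 0
  | row :: rest =>
    let c := row.getD p (Cell.str "")   -- row[p]; out of range (IndexError) is excluded by Pre_
    if c = Cell.str "*" then prodCells nums
    else if c = Cell.str "+" then sumCells nums
    else colLoop rest p (nums ++ [c])

def solve (input : String) : Int :=
  let rows := (PySem.Str.split? (PySem.Str.strip input) "\n").getD []
  let matrix := rows.map (fun r => (PySem.Str.split₀ (PySem.Str.strip r)).map transform)
  let problems := (matrix.headD []).length   -- len(matrix[0]); rows is never empty
  (List.range problems).foldl (fun gt p => gt + colLoop matrix p []) 0

-- ===== PORT B =====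
-- body of B's `for p, nums in enumerate(pending)` loop: state = (nxt, total)
def rowCellStep (row : List String) (acc : List (Option (List Cell)) × Int)
    (pr : Int × Option (List Cell)) : List (Option (List Cell)) × Int :=
  match pr.2 with
  | none => (acc.1 ++ [none], acc.2)
  | some nums =>
    let c := (PySem.List.pyGet? row pr.1).getD ""   -- row[p]; out of range (IndexError) is excluded by Pre_
    if c = "*" then (acc.1 ++ [none], acc.2 + prodCells nums)
    else if c = "+" then (acc.1 ++ [none], acc.2 + sumCells nums)
    else (acc.1 ++ [some (nums ++ [transform c])], acc.2)

-- B's body of `for row in matrix`: rebuild pending and accumulate total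
def rowStep (row : List String) (st : List (Option (List Cell)) × Int) :
    List (Option (List Cell)) × Int :=
  (PySem.List.enumerate st.1).foldl (rowCellStep row) ([], st.2)

def solve_alt (input : String) : Int :=
  let rows := (PySem.Str.split? (PySem.Str.strip input) "\n").getD []
  let matrix := rows.map (fun r => PySem.Str.split₀ (PySem.Str.strip r))
  let problems := (matrix.headD []).length
  (matrix.foldl (fun st row => rowStep row st) (List.replicate problems (some []), 0)).2

-- ===== PRECONDITION & SPEC =====
-- the whitespace-token matrix both programs parse
def pvTokens (input : String) : List (List String) :=
  ((PySem.Str.split? (PySem.Str.strip input) "\n").getD []).map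
    (fun r => PySem.Str.split₀ (PySem.Str.strip r))

-- Pre_ is exactly where Python A returns: in every column the scan reaches an operator (or the last
-- row) before any too-short row (else IndexError), and every token collected before the operator is
-- numeric (else the prod/sum aggregation raises TypeError).
def Pre_solve (input : String) : Prop :=
  ∀ p, p < ((pvTokens input).headD []).length →
    (pvTokens input).findIdx
        (fun r => decide (r.length ≤ p) || (r.getD p "" == "*") || (r.getD p "" == "+"))
      < (pvTokens input).length →
    p < ((pvTokens input).getD ((pvTokens input).findIdx
        (fun r => decide (r.length ≤ p) || (r.getD p "" == "*") || (r.getD p "" == "+"))) []).length ∧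
    ∀ j, j < (pvTokens input).findIdx
        (fun r => decide (r.length ≤ p) || (r.getD p "" == "*") || (r.getD p "" == "+")) →
      PySem.Str.strIsdigit (((pvTokens input).getD j []).getD p "") = true
instance (input : String) : Decidable (Pre_solve input) := by unfold Pre_solve; infer_instance

def pvWitness_solve : String := "1 2\n3 4\n+ *"

def Spec_solve (input : String) (out : Int) : Prop := out = solve_alt input
instance (input : String) (out : Int) : Decidable (Spec_solve input out) := by unfold Spec_solve; infer_instance

-- ===== CLAIM (what is proved, stated in full; the proofs are below) =====
def Claim_equal_solve : Prop := ∀ (input : String), Dom_solve input → Pre_solve input → Spec_solve input (solve input)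

-- ===== LEMMAS AND PROOFS =====

-- string-side version of A's column loop (transform applied per accessed token)
def colLoopS (m : List (List String)) (p : Nat) (nums : List Cell) : Int :=
  match m with
  | [] => 0
  | row :: rest =>
    let c := row.getD p ""
    if c = "*" then prodCells nums
    else if c = "+" then sumCells nums
    else colLoopS rest p (nums ++ [transform c])

lemma transform_eq_str_iff (c s : String) (hs : PySem.Str.strIsdigit s = false) :
    transform c = Cell.str s ↔ c = s := by
  unfold transform
  split_ifs with h
  · constructor
    · intro hc; cases hc
    · rintro rfl; rw [h] at hs; cases hs
  · simp

lemma getD_map_transform (r : List String) (p : Nat) :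
    (r.map transform).getD p (Cell.str "") = transform (r.getD p "") := by
  rcases h : r[p]? with _ | a
  · have h0 : transform "" = Cell.str "" := by decide
    simp [List.getD_eq_getElem?_getD, List.getElem?_map, h, h0]
  · simp [List.getD_eq_getElem?_getD, List.getElem?_map, h]

lemma colLoop_map (m : List (List String)) (p : Nat) (nums : List Cell) :
    colLoop (m.map (fun r => r.map transform)) p nums = colLoopS m p nums := by
  induction m generalizing nums with
  | nil => rfl
  | cons row rest ih =>
    simp only [List.map_cons, colLoop, colLoopS, getD_map_transform]
    have hs : PySem.Str.strIsdigit "*" = false := by decide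
    have hp : PySem.Str.strIsdigit "+" = false := by decide
    by_cases h1 : row.getD p "" = "*"
    · rw [if_pos ((transform_eq_str_iff _ _ hs).mpr h1), if_pos h1]
    · rw [if_neg (fun hc => h1 ((transform_eq_str_iff _ _ hs).mp hc)), if_neg h1]
      by_cases h2 : row.getD p "" = "+"
      · rw [if_pos ((transform_eq_str_iff _ _ hp).mpr h2), if_pos h2]
      · rw [if_neg (fun hc => h2 ((transform_eq_str_iff _ _ hp).mp hc)), if_neg h2, ih]

-- pure per-column step of B's row pass
def cstep (row : List String) (pr : Int × Option (List Cell)) : Option (List Cell) × Int :=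
  match pr.2 with
  | none => (none, 0)
  | some nums =>
    let c := (PySem.List.pyGet? row pr.1).getD ""
    if c = "*" then (none, prodCells nums)
    else if c = "+" then (none, sumCells nums)
    else (some (nums ++ [transform c]), 0)

lemma innerFold_eq (row : List String) (l : List (Int × Option (List Cell)))
    (acc : List (Option (List Cell))) (t : Int) :
    l.foldl (rowCellStep row) (acc, t)
      = (acc ++ l.map (fun pr => (cstep row pr).1),
         t + (l.map (fun pr => (cstep row pr).2)).sum) := by
  induction l generalizing acc t with
  | nil => simp
  | cons pr l ih =>
    rcases pr with ⟨i, s⟩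
    cases s with
    | none => simp [List.foldl_cons, rowCellStep, cstep, ih]
    | some nums =>
      simp only [List.foldl_cons, rowCellStep, cstep]
      split_ifs with h1 h2 <;> simp [*, cstep, add_assoc]

lemma rowStep_eq (row : List String) (pend : List (Option (List Cell))) (t : Int) :
    rowStep row (pend, t)
      = ((PySem.List.enumerate pend).map (fun pr => (cstep row pr).1),
         t + ((PySem.List.enumerate pend).map (fun pr => (cstep row pr).2)).sum) := by
  simp [rowStep, innerFold_eq]

lemma map_enumerate_eq {α β : Type} (xs : List α) (d : α) (f : Int × α → β) :
    (PySem.List.enumerate xs).map f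
      = (List.range xs.length).map (fun (p : Nat) => f ((p : Int), xs.getD p d)) := by
  apply List.ext_getElem
  · simp [PySem.List.length_enumerate]
  · intro i h1 h2
    simp only [List.getElem_map, List.getElem_range]
    have hi : i < xs.length := by simpa [PySem.List.length_enumerate] using
      (by simpa using h1 : i < (PySem.List.enumerate xs 0).length)
    rw [PySem.List.getElem_enumerate, List.getD_eq_getElem xs d hi]
    simp

-- current contribution of column p: already aggregated → 0, else A's remaining column loop
def colResume (m : List (List String)) (p : Nat) : Option (List Cell) → Int
  | none => 0
  | some nums => colLoopS m p nums

lemma col_step (row : List String) (rest : List (List String)) (p : Nat)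
    (s : Option (List Cell)) :
    (cstep row ((p : Int), s)).2 + colResume rest p (cstep row ((p : Int), s)).1
      = colResume (row :: rest) p s := by
  cases s with
  | none => simp [cstep, colResume]
  | some nums =>
    have hc : (PySem.List.pyGet? row ((p : Nat) : Int)).getD "" = row.getD p "" := by
      rw [PySem.List.pyGet?_natCast, ← List.getD_eq_getElem?_getD]
    simp only [cstep, hc, colResume, colLoopS]
    split_ifs with h1 h2 <;> simp

lemma outer_fold (m : List (List String)) (pend : List (Option (List Cell))) (t : Int) :
    (m.foldl (fun st row => rowStep row st) (pend, t)).2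
      = t + ((List.range pend.length).map (fun p => colResume m p (pend.getD p none))).sum := by
  induction m generalizing pend t with
  | nil =>
    simp only [List.foldl_nil]
    have h0 : ((List.range pend.length).map
        (fun p => colResume [] p (pend.getD p none))).sum = 0 := by
      apply List.sum_eq_zero
      intro x hx
      rcases List.mem_map.mp hx with ⟨p, _, rfl⟩
      rcases pend.getD p none with _ | nums <;> simp [colResume, colLoopS]  
    rw [h0]; ring
  | cons row rest ih =>
    rw [List.foldl_cons, rowStep_eq, ih]
    rw [map_enumerate_eq pend none, map_enumerate_eq pend none]
    simp only [List.length_map, List.length_range]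
    have hgetD : ∀ p, p < pend.length →
        (((List.range pend.length).map
            (fun (q : Nat) => (cstep row ((q : Int), pend.getD q none)).1)).getD p none)
          = (cstep row ((p : Int), pend.getD p none)).1 := by
      intro p hp
      exact PySem.List.getD_map_range _ _ _ _ hp
    have hmap : ((List.range pend.length).map (fun (p : Nat) => colResume rest p
          (((List.range pend.length).map
            (fun (q : Nat) => (cstep row ((q : Int), pend.getD q none)).1)).getD p none))) =
        ((List.range pend.length).map (fun (p : Nat) => colResume rest p
          ((cstep row ((p : Int), pend.getD p none)).1))) := by
      apply List.map_congr_left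
      intro p hp
      rw [hgetD p (List.mem_range.mp hp)]
    rw [hmap]
    rw [add_assoc, ← PySem.List.sum_map_add_int]
    congr 1
    refine congrArg List.sum (List.map_congr_left ?_)
    intro p _
    exact col_step row rest p (pend.getD p none)

lemma headD_map_length (m : List (List String)) :
    ((m.map (fun r => r.map transform)).headD []).length = (m.headD []).length := by
  cases m <;> simp

lemma solve_eq_sum (input : String) :
    solve input = ((List.range ((pvTokens input).headD []).length).map
      (fun p => colLoopS (pvTokens input) p [])).sum := by
  simp only [solve]
  have hm : ((PySem.Str.split? (PySem.Str.strip input) "\n").getD []).map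
      (fun r => (PySem.Str.split₀ (PySem.Str.strip r)).map transform)
        = (pvTokens input).map (fun r => r.map transform) := by
    simp [pvTokens, List.map_map]
  rw [hm, PySem.List.foldl_add, headD_map_length]
  simp only [zero_add]
  refine congrArg List.sum (List.map_congr_left ?_)
  intro p _
  exact colLoop_map _ _ _

lemma solve_alt_eq_sum (input : String) :
    solve_alt input = ((List.range ((pvTokens input).headD []).length).map
      (fun p => colLoopS (pvTokens input) p [])).sum := by
  simp only [solve_alt]
  have hm : ((PySem.Str.split? (PySem.Str.strip input) "\n").getD []).map
      (fun r => PySem.Str.split₀ (PySem.Str.strip r)) = pvTokens input := rfl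
  rw [hm, outer_fold, List.length_replicate, zero_add]
  refine congrArg List.sum (List.map_congr_left ?_)
  intro p hp
  rw [List.getD_replicate _ (List.mem_range.mp hp)]
  rfl

lemma solve_main (input : String) : solve input = solve_alt input := by
  rw [solve_eq_sum, solve_alt_eq_sum]

-- ===== VERDICT (by name: the statement is the Claim_ definition above) =====
theorem solve_spec : Claim_equal_solve := by
  intro input _ _
  unfold Spec_solve
  exact solve_main input
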